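-- pv_equiv track=rewrite | github.com/SamanOmidi/ModifiedDes | solve.py | permutation_table
-- ===== SOURCE A (Python) =====
-- def permutation_table(binary_pairs):
--     before, after = zip(*binary_pairs)
--
--     size = len(before[0])
--
--     table = [-1] * size
--
--     for i in range(size):
--         for j in range(size):
--             if j in table:
--                 continue
--             if all(after[k][i] == before[k][j] for k in range(len(binary_pairs))):
--                 table[i] = j
--                 break
--
--     table = [x + 1 for x in table]
--     return table
-- ===== SOURCE B (Python) =====
-- def permutation_table(binary_pairs):
--     before, after = zip(*binary_pairs)
--     size = len(before[0])
--     groups = {}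
--     for j in range(size):
--         sig = ''.join(b[j] for b in before)
--         groups.setdefault(sig, []).append(j)
--     table = []
--     for i in range(size):
--         sig = ''.join(a[i] for a in after)
--         js = groups.get(sig)
--         if js:
--             table.append(js.pop(0) + 1)
--         else:
--             table.append(0)
--     return table
-- ===== Notes on version B (the rewrite author's own statement) =====
-- stated objective: faster
-- what changed: Instead of, for every output position, rescanning all candidate columns and re-comparing every pair row by row, B builds the before-column signatures once into a dict of index lists and answers each after-column by popping the smallest unused index from its signature's group.
-- outside the precondition, e.g. on permutation_table([]): A raises ValueError, B raises ValueError; on permutation_table([('01', 'xy'), ('ab', 'z')]): A returns [0, 0], B raises IndexError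
import Mathlib
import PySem

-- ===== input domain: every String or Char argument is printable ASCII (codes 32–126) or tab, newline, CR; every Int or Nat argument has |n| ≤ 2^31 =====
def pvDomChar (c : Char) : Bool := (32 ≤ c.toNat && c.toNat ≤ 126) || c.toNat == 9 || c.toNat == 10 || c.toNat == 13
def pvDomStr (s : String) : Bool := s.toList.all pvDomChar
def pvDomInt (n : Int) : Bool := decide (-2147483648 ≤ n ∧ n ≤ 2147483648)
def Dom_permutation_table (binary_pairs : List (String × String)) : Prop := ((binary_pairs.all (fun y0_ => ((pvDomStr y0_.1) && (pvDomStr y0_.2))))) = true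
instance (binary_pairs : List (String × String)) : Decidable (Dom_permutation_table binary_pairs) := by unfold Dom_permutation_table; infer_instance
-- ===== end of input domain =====

-- B replaces A's per-position rescan of all candidate columns (re-comparing every pair each time)
-- by a dict of before-column signatures from which the smallest unused index is popped per position.


-- ===== PORT A =====
-- s[i] on an in-range index (Pre_ keeps every index used in range; ' ' is a totalization default never reached inside Pre_)
def pvCharAt (s : List Char) (i : Nat) : Char := s.getD i ' '

-- all(after[k][i] == before[k][j] for k in range(len(binary_pairs)))
def pvTest (before after : List (List Char)) (m i j : Nat) : Bool :=
  (List.range m).all (fun k => pvCharAt (after.getD k []) i == pvCharAt (before.getD k []) j)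

-- the inner 'for j in range(size)' with continue/break: first j not in table whose columns match
def pvFindJ (before after : List (List Char)) (m i : Nat) (table : List Int) : List Nat → Option Nat
  | [] => none
  | j :: js =>
      if (j : Int) ∈ table then pvFindJ before after m i table js
      else if pvTest before after m i j then some j
      else pvFindJ before after m i table js

def pvStepA (before after : List (List Char)) (m size : Nat) (table : List Int) (i : Nat) : List Int :=
  match pvFindJ before after m i table (List.range size) with
  | some j => table.set i (j : Int)
  | none => table

def permutation_table (binary_pairs : List (String × String)) : List Int :=
  let before := binary_pairs.map (fun p => p.1.toList)
  let after := binary_pairs.map (fun p => p.2.toList)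
  let size := (before.headD []).length
  ((List.range size).foldl (pvStepA before after binary_pairs.length size)
      (List.replicate size (-1 : Int))).map (· + 1)

-- ===== PORT B =====
-- ''.join(r[idx] for r in rows): the column signature at idx (kept as List Char, the list side of str)
def pvSig (rows : List (List Char)) (idx : Nat) : List Char := rows.map (fun r => pvCharAt r idx)

-- groups.setdefault(sig, []).append(j): dict update groups[sig] = groups.get(sig, []) + [j]
def pvGroups (before : List (List Char)) (size : Nat) : PySem.Dict (List Char) (List Int) :=
  (List.range size).foldl (fun d j => d.modify (pvSig before j) [] (fun l => l ++ [(j : Int)])) PySem.Dict.empty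

-- js = groups.get(sig); if js: table.append(js.pop(0)+1) else: table.append(0)
def pvStepB (after : List (List Char)) (st : PySem.Dict (List Char) (List Int) × List Int) (i : Nat) :
    PySem.Dict (List Char) (List Int) × List Int :=
  match st.1.get? (pvSig after i) with
  | some (j :: js) => (st.1.insert (pvSig after i) js, st.2 ++ [j + 1])
  | _ => (st.1, st.2 ++ [0])

def permutation_table_alt (binary_pairs : List (String × String)) : List Int :=
  let before := binary_pairs.map (fun p => p.1.toList)
  let after := binary_pairs.map (fun p => p.2.toList)
  let size := (before.headD []).length
  ((List.range size).foldl (pvStepB after) (pvGroups before size, [])).2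

-- ===== PRECONDITION & SPEC =====
-- Pre_ excludes the empty list (A raises ValueError unpacking zip(*[])) and inputs containing a string
-- shorter than size = len(before[0]): there Python indexing is out of range — B always raises IndexError,
-- while A raises unless its all(...) happens to short-circuit on an earlier mismatching pair.
def Pre_permutation_table (binary_pairs : List (String × String)) : Prop :=
  binary_pairs ≠ [] ∧
  ∀ p ∈ binary_pairs,
    (binary_pairs.headD ("", "")).1.toList.length ≤ p.1.toList.length ∧
    (binary_pairs.headD ("", "")).1.toList.length ≤ p.2.toList.length
instance (binary_pairs : List (String × String)) : Decidable (Pre_permutation_table binary_pairs) := by unfold Pre_permutation_table; infer_instance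

def pvWitness_permutation_table : (List (String × String)) := ([("01", "10"), ("00", "00")])

def Spec_permutation_table (binary_pairs : List (String × String)) (out : List Int) : Prop := out = permutation_table_alt binary_pairs
instance (binary_pairs : List (String × String)) (out : List Int) : Decidable (Spec_permutation_table binary_pairs out) := by unfold Spec_permutation_table; infer_instance

-- ===== CLAIM (what is proved, stated in full; the proofs are below) =====
def Claim_equal_permutation_table : Prop := ∀ (binary_pairs : List (String × String)), Dom_permutation_table binary_pairs → Pre_permutation_table binary_pairs → Spec_permutation_table binary_pairs (permutation_table binary_pairs)

-- ===== LEMMAS AND PROOFS =====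
-- the list stored under key s in the groups dict: indices whose before-column signature is s
def pvOrig (before : List (List Char)) (n : Nat) (s : List Char) : List Int :=
  ((List.range n).filter (fun j => pvSig before j == s)).map ((fun j => (j : Int)) : Nat → Int)

theorem pv_find?_head? (l : List Nat) (p : Nat → Bool) : l.find? p = (l.filter p).head? := by
  induction l with
  | nil => rfl
  | cons a t ih =>
    rw [List.find?_cons, List.filter_cons]
    by_cases h : p a <;> simp only [h, if_pos, List.head?_cons, ih, Bool.false_eq_true, if_false]
theorem pv_find_eq (before after : List (List Char)) (m i : Nat) (table : List Int) (l : List Nat) :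
    pvFindJ before after m i table l
      = l.find? (fun (j : Nat) => !decide ((j : Int) ∈ table) && pvTest before after m i j) := by
  induction l with
  | nil => rfl
  | cons j js ih =>
    rw [List.find?_cons]
    by_cases hm : (j : Int) ∈ table
    · simp [pvFindJ, hm, ih]
    · by_cases htst : pvTest before after m i j <;> simp [pvFindJ, hm, htst, ih]
theorem pv_test_eq (before after : List (List Char)) (m i j : Nat)
    (hb : before.length = m) (ha : after.length = m) :
    pvTest before after m i j = (pvSig after i == pvSig before j) := by
  rw [Bool.eq_iff_iff]
  simp only [pvTest, List.all_eq_true, List.mem_range, beq_iff_eq, pvSig]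
  constructor
  · intro h
    apply List.ext_getElem (by simp [hb, ha])
    intro k h1 h2
    simp only [List.getElem_map]
    have hk : k < m := by simpa [ha] using h1
    have := h k hk
    rwa [List.getD_eq_getElem _ _ (by omega), List.getD_eq_getElem _ _ (by omega)] at this
  · intro h k hk
    have h1 : k < (after.map (fun r => pvCharAt r i)).length := by simp; omega
    have h2 : k < (before.map (fun r => pvCharAt r j)).length := by simp; omega
    have hh := List.getElem_of_eq h h1
    simp only [List.getElem_map] at hh
    rw [List.getD_eq_getElem _ _ (by omega), List.getD_eq_getElem _ _ (by omega)]
    exact hh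
theorem pv_mem_set (table : List Int) (t : Nat) (v x : Int) (ht : t < table.length)
    (htv : table.getD t 0 = -1) (hx : x ≠ -1) :
    x ∈ table.set t v ↔ x ∈ table ∨ x = v := by
  rw [List.getD_eq_getElem _ _ ht] at htv
  constructor
  · intro h
    rw [List.mem_iff_getElem] at h
    obtain ⟨p, hp, hpe⟩ := h
    rw [List.length_set] at hp
    rw [List.getElem_set] at hpe
    by_cases hpt : t = p
    · right; rw [if_pos hpt] at hpe; exact hpe.symm
    · left; rw [if_neg hpt] at hpe; exact hpe ▸ List.getElem_mem hp
  · intro h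
    rcases h with h | rfl
    · rw [List.mem_iff_getElem] at h ⊢
      obtain ⟨p, hp, hpe⟩ := h
      refine ⟨p, by simpa using hp, ?_⟩
      rw [List.getElem_set]
      by_cases hpt : t = p
      · exfalso; subst hpt; rw [hpe] at htv; exact hx htv
      · rw [if_neg hpt]; exact hpe
    · rw [List.mem_iff_getElem]
      exact ⟨t, by simpa using ht, by rw [List.getElem_set]; simp⟩
theorem pv_groups_getD (before : List (List Char)) (n : Nat) (s : List Char) :
    (pvGroups before n).getD s [] = pvOrig before n s := by
  have h1 : (((List.range n).map (fun j => (pvSig before j, (j : Int)))).foldl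
        (fun d p => PySem.Dict.modify d p.1 [] (fun l => l ++ [p.2])) PySem.Dict.empty)
      = pvGroups before n := by
    rw [List.foldl_map]
    rfl
  rw [← h1, PySem.Dict.getD_foldl_modify_append, List.filter_map, List.map_map]
  simp only [pvOrig, PySem.Dict.getD_empty, List.nil_append, Function.comp_def]
theorem pv_filter_map (l : List Nat) (R : Int → Bool) (Q P : Nat → Bool)
    (h : ∀ j ∈ l, (Q j && R (j : Int)) = P j) :
    ((l.filter Q).map ((fun j => (j : Int)) : Nat → Int)).filter R
      = (l.filter P).map ((fun j => (j : Int)) : Nat → Int) := by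
  induction l with
  | nil => rfl
  | cons a t ih =>
    have ha := h a (by simp)
    have iht := ih (fun j hj => h j (by simp [hj]))
    rw [List.filter_cons, List.filter_cons]
    by_cases hq : Q a
    · by_cases hr : R (a : Int)
      · have hp : P a = true := by rw [← ha, hq, hr]; rfl
        rw [hq, hp, if_pos rfl, if_pos rfl, List.map_cons, List.filter_cons, hr, if_pos rfl,
          List.map_cons, iht]
      · have hr' : R (a : Int) = false := by simpa using hr
        have hp : P a = false := by rw [← ha, hq, hr']; rfl
        rw [hq, hp, if_pos rfl, List.map_cons, List.filter_cons, hr']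
        simpa using iht
    · have hq' : Q a = false := by simpa using hq
      have hp : P a = false := by rw [← ha, hq']; rfl
      rw [hq', hp]
      simpa using iht

theorem pv_filter_tail (l : List Nat) (P : Nat → Bool) (j0 : Nat) (rest : List Nat)
    (hF : l.filter P = j0 :: rest) (hnd : l.Nodup) :
    l.filter (fun j => P j && !(j == j0)) = rest := by
  have h1 : ((l.filter P).filter (fun j => !(j == j0))) = l.filter (fun j => P j && !(j == j0)) := by
    rw [List.filter_filter]
    exact List.filter_congr (fun a _ => Bool.and_comm _ _)
  have hnd' : (j0 :: rest).Nodup := hF ▸ hnd.filter P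
  have hj0rest : j0 ∉ rest := (List.nodup_cons.mp hnd').1
  rw [← h1, hF, List.filter_cons]
  simp only [beq_self_eq_true, Bool.not_true, Bool.false_eq_true, if_false]
  apply List.filter_eq_self.mpr
  intro a ha
  have : a ≠ j0 := fun hh => hj0rest (hh ▸ ha)
  simp [this]
theorem pv_step (before after : List (List Char)) (m n t : Nat)
    (hb : before.length = m) (ha : after.length = m)
    (table : List Int) (d : PySem.Dict (List Char) (List Int)) (out : List Int)
    (ht : t < n) (H1 : table.length = n)
    (H2 : ∀ p, t ≤ p → p < n → table.getD p 0 = -1)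
    (H4 : ∀ s, d.getD s [] = (pvOrig before n s).filter (fun x => !decide (x ∈ table))) :
    (pvStepB after (d, out) t).2 = out ++ [(pvStepA before after m n table t).getD t 0 + 1] ∧
    (pvStepA before after m n table t).length = n ∧
    (∀ p, t + 1 ≤ p → p < n → (pvStepA before after m n table t).getD p 0 = -1) ∧
    (∀ p, p < t → (pvStepA before after m n table t).getD p 0 = table.getD p 0) ∧
    (∀ s, (pvStepB after (d, out) t).1.getD s [] =
      (pvOrig before n s).filter (fun x => !decide (x ∈ pvStepA before after m n table t))) := by
  have E2 : pvFindJ before after m t table (List.range n)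
      = ((List.range n).filter (fun (j : Nat) => !decide ((j : Int) ∈ table)
            && (pvSig after t == pvSig before j))).head? := by
    rw [pv_find_eq, pv_find?_head?]
    congr 1
    apply List.filter_congr
    intro j _
    rw [pv_test_eq before after m t j hb ha]
  have E1 : d.getD (pvSig after t) []
      = ((List.range n).filter (fun (j : Nat) => !decide ((j : Int) ∈ table)
            && (pvSig after t == pvSig before j))).map ((fun j => (j : Int)) : Nat → Int) := by
    rw [H4]
    unfold pvOrig
    refine pv_filter_map (List.range n) _ _ _ ?_
    intro j _
    rw [Bool.and_comm]
    congr 1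
    rw [Bool.eq_iff_iff]
    simp only [beq_iff_eq]
    exact eq_comm
  cases hF : (List.range n).filter (fun (j : Nat) => !decide ((j : Int) ∈ table)
      && (pvSig after t == pvSig before j)) with
  | nil =>
    have hfind : pvFindJ before after m t table (List.range n) = none := by rw [E2, hF]; rfl
    have hA : pvStepA before after m n table t = table := by
      simp only [pvStepA, hfind]
    have hgetD : d.getD (pvSig after t) [] = [] := by rw [E1, hF]; rfl
    have hB : pvStepB after (d, out) t = (d, out ++ [0]) := by
      rw [PySem.Dict.getD_eq_get?_getD] at hgetD
      simp only [pvStepB]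
      cases hg : d.get? (pvSig after t) with
      | none => rfl
      | some l =>
        rw [hg] at hgetD
        simp only [Option.getD_some] at hgetD
        subst hgetD
        rfl
    refine ⟨?_, ?_, ?_, ?_, ?_⟩
    · rw [hB, hA, H2 t le_rfl ht]; rfl
    · rw [hA]; exact H1
    · intro p h1 h2; rw [hA]; exact H2 p (by omega) h2
    · intro p _; rw [hA]
    · intro s; rw [hB, hA]; exact H4 s
  | cons j0 rest =>
    have hfind : pvFindJ before after m t table (List.range n) = some j0 := by rw [E2, hF]; rfl
    have hA : pvStepA before after m n table t = table.set t (j0 : Int) := by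
      simp only [pvStepA, hfind]
    have hgetD : d.getD (pvSig after t) []
        = (j0 : Int) :: rest.map ((fun j => (j : Int)) : Nat → Int) := by
      rw [E1, hF, List.map_cons]
    have hget : d.get? (pvSig after t)
        = some ((j0 : Int) :: rest.map ((fun j => (j : Int)) : Nat → Int)) := by
      rw [PySem.Dict.getD_eq_get?_getD] at hgetD
      cases hg : d.get? (pvSig after t) with
      | none => rw [hg] at hgetD; simp at hgetD
      | some l => rw [hg] at hgetD; simp only [Option.getD_some] at hgetD; rw [hgetD]
    have hB : pvStepB after (d, out) t
        = (d.insert (pvSig after t) (rest.map ((fun j => (j : Int)) : Nat → Int)),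
           out ++ [(j0 : Int) + 1]) := by
      simp only [pvStepB, hget]
    have hj0f : j0 ∈ (List.range n).filter (fun (j : Nat) => !decide ((j : Int) ∈ table)
        && (pvSig after t == pvSig before j)) := by rw [hF]; exact List.mem_cons_self
    have hj0n : j0 < n := List.mem_range.mp (List.mem_of_mem_filter hj0f)
    have hPj0 := List.of_mem_filter hj0f
    simp only [Bool.and_eq_true, Bool.not_eq_eq_eq_not, Bool.not_true, decide_eq_false_iff_not,
      beq_iff_eq] at hPj0
    obtain ⟨hj0tab, hsig⟩ := hPj0
    have htlen : t < table.length := by omega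
    have htd : table.getD t 0 = -1 := H2 t le_rfl ht
    have hlenset : (table.set t (j0 : Int)).length = table.length := List.length_set ..
    refine ⟨?_, ?_, ?_, ?_, ?_⟩
    · rw [hB, hA]
      have : (table.set t (j0 : Int)).getD t 0 = (j0 : Int) := by
        rw [List.getD_eq_getElem _ _ (by omega)]
        simp
      rw [this]
    · rw [hA, hlenset]; exact H1
    · intro p h1 h2
      rw [hA, List.getD_eq_getElem _ _ (by omega), List.getElem_set, if_neg (by omega)]
      have := H2 p (by omega) h2
      rwa [List.getD_eq_getElem _ _ (by omega)] at this
    · intro p hp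
      rw [hA, List.getD_eq_getElem _ _ (by omega), List.getElem_set, if_neg (by omega),
        List.getD_eq_getElem _ _ (by omega)]
    · intro s
      rw [hB, hA]
      rw [PySem.Dict.getD_insert]
      split_ifs with hs
      · subst hs
        have hR : (pvOrig before n (pvSig after t)).filter
              (fun x => !decide (x ∈ table.set t (j0 : Int)))
            = ((List.range n).filter (fun (j : Nat) => (!decide ((j : Int) ∈ table)
                && (pvSig after t == pvSig before j)) && !(j == j0))).map
              ((fun j => (j : Int)) : Nat → Int) := by
          unfold pvOrig
          refine pv_filter_map (List.range n) _ _ _ ?_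
          intro j _
          have hxne : ((j : Int)) ≠ -1 := by omega
          have hms := pv_mem_set table t ((j0 : Int)) ((j : Int)) htlen htd hxne
          rw [Bool.eq_iff_iff]
          simp only [Bool.and_eq_true, Bool.not_eq_true', decide_eq_false_iff_not, beq_iff_eq,
            beq_eq_false_iff_ne, ne_eq]
          rw [hms, not_or]
          constructor
          · rintro ⟨h1, h2, h3⟩
            exact ⟨⟨h2, h1.symm⟩, fun hh => h3 (by exact_mod_cast hh)⟩
          · rintro ⟨⟨h1, h2⟩, h3⟩
            exact ⟨h2.symm, h1, fun hh => h3 (by exact_mod_cast hh)⟩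
        rw [hR, pv_filter_tail (List.range n) _ j0 rest hF List.nodup_range]
      · rw [H4 s]
        apply List.filter_congr
        intro x hx
        unfold pvOrig at hx
        obtain ⟨j, hjf, rfl⟩ := List.mem_map.mp hx
        have hQ : pvSig before j = s := by
          have := List.of_mem_filter hjf
          simpa [beq_iff_eq] using this
        have hxne : ((j : Int)) ≠ -1 := by omega
        have hjne : ((j : Int)) ≠ ((j0 : Int)) := by
          intro hh
          have hjj : j = j0 := by exact_mod_cast hh
          exact hs (by rw [← hQ, hjj, ← hsig])
        have hms := pv_mem_set table t ((j0 : Int)) ((j : Int)) htlen htd hxne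
        rw [Bool.eq_iff_iff]
        simp only [Bool.not_eq_true', decide_eq_false_iff_not]
        rw [hms, not_or]
        constructor
        · intro h1; exact ⟨h1, hjne⟩
        · rintro ⟨h1, _⟩; exact h1
theorem pv_loop (before after : List (List Char)) (m n : Nat)
    (hb : before.length = m) (ha : after.length = m) :
    ∀ (len t : Nat) (table : List Int) (d : PySem.Dict (List Char) (List Int)) (out : List Int),
    t + len = n →
    table.length = n →
    (∀ p, t ≤ p → p < n → table.getD p 0 = -1) →
    (∀ s, d.getD s [] = (pvOrig before n s).filter (fun x => !decide (x ∈ table))) →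
    (((List.range' t len).foldl (pvStepB after) (d, out)).2
       = out ++ (List.range' t len).map
           (fun p => ((List.range' t len).foldl (pvStepA before after m n) table).getD p 0 + 1))
    ∧ (∀ p, p < t → ((List.range' t len).foldl (pvStepA before after m n) table).getD p 0
          = table.getD p 0)
    ∧ ((List.range' t len).foldl (pvStepA before after m n) table).length = n := by
  intro len
  induction len with
  | zero =>
    intro t table d out _ H1 _ _
    simpa [List.range'] using H1
  | succ len ih =>
    intro t table d out hn H1 H2 H4
    have ht : t < n := by omega
    obtain ⟨hOut, hLen, hH2, hPres, hH4⟩ :=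
      pv_step before after m n t hb ha table d out ht H1 H2 H4
    rw [List.range'_succ, List.foldl_cons, List.foldl_cons]
    have hpair : pvStepB after (d, out) t
        = ((pvStepB after (d, out) t).1, (pvStepB after (d, out) t).2) := rfl
    rw [hpair]
    obtain ⟨ihOut, ihPres, ihLen⟩ := ih (t + 1) (pvStepA before after m n table t)
      (pvStepB after (d, out) t).1 (pvStepB after (d, out) t).2
      (by omega) hLen hH2 hH4
    refine ⟨?_, ?_, ?_⟩
    · rw [ihOut, hOut, List.map_cons]
      have hT : ((List.range' (t + 1) len).foldl (pvStepA before after m n)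
            (pvStepA before after m n table t)).getD t 0
          = (pvStepA before after m n table t).getD t 0 := ihPres t (by omega)
      rw [hT, List.append_assoc, List.singleton_append]
    · intro p hp
      rw [ihPres p (by omega), hPres p hp]
    · exact ihLen
theorem pv_general (before after : List (List Char)) (m n : Nat)
    (hb : before.length = m) (ha : after.length = m) :
    ((List.range n).foldl (pvStepA before after m n) (List.replicate n (-1))).map (· + 1)
      = ((List.range n).foldl (pvStepB after) (pvGroups before n, [])).2 := by
  have hinit4 : ∀ s, (pvGroups before n).getD s []
      = (pvOrig before n s).filter (fun x => !decide (x ∈ List.replicate n (-1 : Int))) := by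
    intro s
    rw [pv_groups_getD]
    refine (List.filter_eq_self.mpr ?_).symm
    intro x hx
    obtain ⟨j, _, rfl⟩ := List.mem_map.mp hx
    simp only [Bool.not_eq_true', decide_eq_false_iff_not, List.mem_replicate]
    intro ⟨_, hh⟩
    omega
  obtain ⟨hOut, _, hLen⟩ := pv_loop before after m n hb ha n 0 (List.replicate n (-1))
    (pvGroups before n) [] (by omega) (by simp)
    (by intro p _ hp; rw [List.getD_eq_getElem _ _ (by simp; omega)]; simp)
    hinit4
  rw [List.range_eq_range']
  rw [hOut, List.nil_append]
  apply List.ext_getElem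
  · simp [hLen]
  · intro i h1 h2
    simp only [List.getElem_map, List.getElem_range']
    rw [List.getD_eq_getElem _ _ (by rw [hLen]; simpa using h2)]
    simp

theorem pv_main (bp : List (String × String)) : permutation_table bp = permutation_table_alt bp := by
  unfold permutation_table permutation_table_alt
  exact pv_general (bp.map (fun p => p.1.toList)) (bp.map (fun p => p.2.toList)) bp.length
    (((bp.map (fun p => p.1.toList)).headD []).length) (by simp) (by simp)

-- ===== VERDICT (by name: the statement is the Claim_ definition above) =====
theorem permutation_table_spec : Claim_equal_permutation_table := by
  intro bp _ _
  unfold Spec_permutation_table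
  exact pv_main bp
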